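-- pv_equiv track=rewrite | github.com/aalvinlin/Graphs | projects/ancestor/ancestor.py | earliest_ancestor_v2
-- ===== SOURCE A (Python) =====
-- def earliest_ancestor_v2(ancestors, starting_node):
--
--     known_parents = dict()
--
--     depths = dict()
--
--     # store parent-child information immediately available from "ancestors" in a dictionary
--     for parent_child_pair in ancestors:
--         parent, child = parent_child_pair
--
--         if child not in known_parents:
--             known_parents[child] = [parent]
--         else:
--             known_parents[child].append(parent)
--
--         if parent not in known_parents:
--             known_parents[parent] = []
--
--     # assign a generation for each ancestral node that can be reached from a starting node
--     def assign_depths(starting_node, current_depth):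
--
--         for parent in known_parents[starting_node]:
--
--             depths[parent] = current_depth + 1
--
--             assign_depths(parent, current_depth + 1)
--
--     assign_depths(starting_node, 0)
--
--     # find the furthest node from the starting node
--     deepest_depth = 0
--     deepest_node = None
--
--     for node in depths:
--
--         if depths[node] > deepest_depth:
--             deepest_depth = depths[node]
--             deepest_node = node
--
--     # return -1 if the starting node has no ancestors
--     if not deepest_node:
--         return -1
--     else:
--         return deepest_node
-- ===== SOURCE B (Python) =====
-- def earliest_ancestor_v2(ancestors, starting_node):
--
--     known_parents = {}
--
--     # same parent-map, built with setdefault instead of membership tests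
--     for parent, child in ancestors:
--         known_parents.setdefault(child, []).append(parent)
--         known_parents.setdefault(parent, [])
--
--     # iterative pre-order DFS with an explicit worklist instead of recursion;
--     # a popped entry records its depth (last write wins, as in the recursion)
--     depths = {}
--     worklist = [(starting_node, 0)]
--     while worklist:
--         node, depth = worklist.pop(0)
--         if depth:
--             depths[node] = depth
--         worklist[:0] = [(parent, depth + 1) for parent in known_parents[node]]
--
--     deepest_node = max(depths, key=depths.get, default=None)
--     return deepest_node if deepest_node else -1
-- ===== Notes on version B (the rewrite author's own statement) =====
-- stated objective: alternative
-- what changed: The recursive assign_depths is replaced by an explicit worklist loop that pops (node, depth) entries and prepends the node's parents, reproducing the same pre-order assignment sequence, and the two hand-written scan loops are replaced by dict.setdefault and max(depths, key=depths.get, default=None).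
import Mathlib
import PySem

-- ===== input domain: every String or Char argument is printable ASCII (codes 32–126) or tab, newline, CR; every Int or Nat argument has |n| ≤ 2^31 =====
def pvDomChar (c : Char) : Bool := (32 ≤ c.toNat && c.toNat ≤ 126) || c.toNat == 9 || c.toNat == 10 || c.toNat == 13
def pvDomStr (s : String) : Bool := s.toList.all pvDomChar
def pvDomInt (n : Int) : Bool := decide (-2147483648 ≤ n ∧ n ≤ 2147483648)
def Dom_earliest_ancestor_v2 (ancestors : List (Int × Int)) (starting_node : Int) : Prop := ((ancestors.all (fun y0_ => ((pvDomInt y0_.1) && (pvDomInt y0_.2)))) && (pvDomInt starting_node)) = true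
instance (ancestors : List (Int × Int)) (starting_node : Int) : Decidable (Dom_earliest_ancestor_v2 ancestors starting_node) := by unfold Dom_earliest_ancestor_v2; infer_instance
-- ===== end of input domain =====

-- B replaces A's recursive depth assignment by an explicit worklist loop (same pre-order,
-- last write wins) and A's two hand-written scan loops by setdefault / max with a key;
-- objective: alternative (no speed claim).

-- ===== PORT A =====

-- A's first loop: build the child -> list-of-parents dictionary
def buildA (ancestors : List (Int × Int)) : PySem.Dict Int (List Int) :=
  ancestors.foldl (fun kp pc =>
    let kp1 := if kp.contains pc.2 then kp.modify pc.2 [] (fun l => l ++ [pc.1])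
               else kp.insert pc.2 [pc.1]
    if kp1.contains pc.1 then kp1 else kp1.insert pc.1 []) PySem.Dict.empty

-- A's recursive assign_depths.  The fuel and the `node ∈ path` guard are totalisation
-- devices only: `none` is exactly where Python A raises (KeyError on a missing key,
-- unbounded recursion on a reachable cycle); both are excluded by Pre_ below.
def dfsA (kp : PySem.Dict Int (List Int)) : Nat → List Int → Int → Int → PySem.Dict Int Int → Option (PySem.Dict Int Int)
  | 0, _, _, _, _ => none
  | fuel + 1, path, node, depth, ds =>
    if node ∈ path then none
    else
      match kp.get? node with
      | none => none
      | some parents =>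
        parents.foldl (fun acc p =>
          acc.bind (fun ds' => dfsA kp fuel (path ++ [node]) p (depth + 1) (ds'.insert p (depth + 1))))
          (some ds)

def earliest_ancestor_v2 (ancestors : List (Int × Int)) (starting_node : Int) : Int :=
  let known_parents := buildA ancestors
  match dfsA known_parents (2 * ancestors.length + 3) [] starting_node 0 PySem.Dict.empty with
  | none => -1   -- Python A raises here; outside Pre_
  | some depths =>
    let acc := depths.keys.foldl
      (fun (acc : Int × Option Int) node =>
        if depths.getD node 0 > acc.1 then (depths.getD node 0, some node) else acc)
      (0, (none : Option Int))
    match acc.2 with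
    | none => -1
    | some x => if x == 0 then -1 else x   -- `if not deepest_node` (None and 0 are falsy)

-- ===== PORT B =====

-- B's build loop, written with setdefault
def buildB (ancestors : List (Int × Int)) : PySem.Dict Int (List Int) :=
  ancestors.foldl (fun kp pc =>
    ((kp.setdefault pc.2 []).modify pc.2 [] (fun l => l ++ [pc.1])).setdefault pc.1 [])
    PySem.Dict.empty

-- B's worklist loop.  The fuel is a totalisation device only: `none` is exactly where
-- Python B raises (KeyError) or diverges (reachable cycle); both are excluded by Pre_.
def loopB (kp : PySem.Dict Int (List Int)) : Nat → List (Int × Int) → PySem.Dict Int Int → Option (PySem.Dict Int Int)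
  | 0, _, _ => none
  | _ + 1, [], ds => some ds
  | fuel + 1, (node, depth) :: rest, ds =>
    let ds' := if depth ≠ 0 then ds.insert node depth else ds
    match kp.get? node with
    | none => none
    | some parents => loopB kp fuel (parents.map (fun p => (p, depth + 1)) ++ rest) ds'

def earliest_ancestor_v2_alt (ancestors : List (Int × Int)) (starting_node : Int) : Int :=
  let known_parents := buildB ancestors
  match loopB known_parents ((ancestors.length + 2) ^ (2 * ancestors.length + 4)) [(starting_node, 0)] PySem.Dict.empty with
  | none => -1   -- Python B raises / diverges here; outside Pre_
  | some depths =>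
    match PySem.List.max? depths.keys (fun n => depths.getD n 0) with
    | none => -1
    | some x => if x == 0 then -1 else x   -- `deepest_node if deepest_node else -1`

-- ===== PRECONDITION & SPEC =====

-- all nodes mentioned in the edge list
def nodesList (ancestors : List (Int × Int)) : List Int :=
  ancestors.flatMap (fun pc => [pc.2, pc.1])

-- parents of n, in edge order
def parentsOf (ancestors : List (Int × Int)) (n : Int) : List Int :=
  (ancestors.filter (fun pc => pc.2 == n)).map (·.1)

-- one step of child-to-parent reachability (a deduplicated list of nodes)
def pstep (ancestors : List (Int × Int)) (S : List Int) : List Int :=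
  (S ++ S.flatMap (parentsOf ancestors)).dedup

-- nodes reachable from S in at most k child-to-parent steps
def reachN (ancestors : List (Int × Int)) (k : Nat) (S : List Int) : List Int :=
  (pstep ancestors)^[k] S

-- Pre_ excludes exactly the inputs on which Python A never returns: a starting node that
-- does not occur in `ancestors` (KeyError) and a cycle of parent edges reachable from the
-- starting node (unbounded recursion).
def Pre_earliest_ancestor_v2 (ancestors : List (Int × Int)) (starting_node : Int) : Prop :=
  starting_node ∈ nodesList ancestors ∧
  ∀ n ∈ reachN ancestors (2 * ancestors.length + 2) [starting_node],
    n ∉ reachN ancestors (2 * ancestors.length + 2) (parentsOf ancestors n)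

instance (ancestors : List (Int × Int)) (starting_node : Int) : Decidable (Pre_earliest_ancestor_v2 ancestors starting_node) := by
  unfold Pre_earliest_ancestor_v2; infer_instance

def pvWitness_earliest_ancestor_v2 : (List (Int × Int)) × Int := ([((1 : Int), (2 : Int))], (2 : Int))

def Spec_earliest_ancestor_v2 (ancestors : List (Int × Int)) (starting_node : Int) (out : Int) : Prop :=
  out = earliest_ancestor_v2_alt ancestors starting_node
instance (ancestors : List (Int × Int)) (starting_node : Int) (out : Int) : Decidable (Spec_earliest_ancestor_v2 ancestors starting_node out) := by
  unfold Spec_earliest_ancestor_v2; infer_instance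

-- ===== CLAIM (what is proved, stated in full; the proofs are below) =====
def Claim_equal_earliest_ancestor_v2 : Prop := ∀ (ancestors : List (Int × Int)) (starting_node : Int), Dom_earliest_ancestor_v2 ancestors starting_node → Pre_earliest_ancestor_v2 ancestors starting_node → Spec_earliest_ancestor_v2 ancestors starting_node (earliest_ancestor_v2 ancestors starting_node)

-- ===== LEMMAS AND PROOFS =====

theorem setdefault_ite {κ ν : Type} [BEq κ] (d : PySem.Dict κ ν) (k : κ) (v : ν) :
    d.setdefault k v = if d.contains k then d else d.insert k v := by
  by_cases h : d.contains k
  · rw [PySem.Dict.setdefault_of_contains d v h]; simp [h]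
  · simp only [Bool.not_eq_true] at h
    rw [PySem.Dict.setdefault_of_not_contains d v h]; simp [h]

theorem build_eq (ancestors : List (Int × Int)) : buildB ancestors = buildA ancestors := by
  unfold buildA buildB
  congr 1
  funext kp pc
  rw [setdefault_ite, setdefault_ite]
  by_cases hc : kp.contains pc.2
  · simp [hc]
  · simp only [hc, Bool.false_eq_true, if_false]
    simp [PySem.Dict.modify, PySem.Dict.getD_insert_self, PySem.Dict.insert_insert_self]

theorem parentsOf_eq_nil (ancestors : List (Int × Int)) (n : Int)
    (h : n ∉ nodesList ancestors) : parentsOf ancestors n = [] := by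
  unfold parentsOf
  rw [List.filter_eq_nil_iff.mpr]
  · rfl
  · intro pc hpc hbeq
    exact h (by simp [nodesList]; exact ⟨pc.1, pc.2, hpc, Or.inl (by simp at hbeq; omega)⟩)

theorem buildA_get? (ancestors : List (Int × Int)) (n : Int) :
    (buildA ancestors).get? n =
      if n ∈ nodesList ancestors then some (parentsOf ancestors n) else none := by
  induction ancestors using List.reverseRecOn generalizing n with
  | nil => simp [buildA, nodesList, PySem.Dict.get?, PySem.Dict.empty]
  | append_singleton xs pc ih =>
    have hstep : buildA (xs ++ [pc]) =
        (let kp1 := if (buildA xs).contains pc.2 then (buildA xs).modify pc.2 [] (fun l => l ++ [pc.1])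
                    else (buildA xs).insert pc.2 [pc.1]
         if kp1.contains pc.1 then kp1 else kp1.insert pc.1 []) := by
      simp [buildA, List.foldl_append]
    rw [hstep]
    have hcont : ∀ m, (buildA xs).contains m = decide (m ∈ nodesList xs) := by
      intro m; rw [PySem.Dict.contains_eq_isSome_get?, ih]
      by_cases h : m ∈ nodesList xs <;> simp [h]
    have hkp1 : (if (buildA xs).contains pc.2 then (buildA xs).modify pc.2 [] (fun l => l ++ [pc.1])
                    else (buildA xs).insert pc.2 [pc.1])
        = (buildA xs).insert pc.2 (parentsOf xs pc.2 ++ [pc.1]) := by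
      by_cases h : pc.2 ∈ nodesList xs
      · simp [hcont, h, PySem.Dict.modify, PySem.Dict.getD, ih]
      · simp [hcont, h, parentsOf_eq_nil xs pc.2 h]
    simp only [hkp1]
    have hnodes : nodesList (xs ++ [pc]) = nodesList xs ++ [pc.2, pc.1] := by simp [nodesList]
    have hpar : parentsOf (xs ++ [pc]) n = parentsOf xs n ++ (if pc.2 = n then [pc.1] else []) := by
      by_cases h : pc.2 = n <;> simp [parentsOf, List.filter_append, h]
    rw [hnodes, hpar]
    have hccp : ((buildA xs).insert pc.2 (parentsOf xs pc.2 ++ [pc.1])).contains pc.1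
        = decide (pc.1 = pc.2 ∨ pc.1 ∈ nodesList xs) := by
      rw [PySem.Dict.contains_insert, hcont]
      by_cases h1 : pc.1 = pc.2 <;> by_cases h2 : pc.1 ∈ nodesList xs <;> simp [h1, h2]
    by_cases hcp : pc.1 = pc.2 ∨ pc.1 ∈ nodesList xs
    · rw [if_pos (by rw [hccp]; simpa using hcp)]
      rw [PySem.Dict.get?_insert]
      by_cases h2 : n = pc.2
      · subst h2; simp
      · rw [if_neg h2, ih]
        by_cases h1 : n ∈ nodesList xs
        · simp [h1]; omega
        · by_cases h3 : n = pc.1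
          · subst h3; rcases hcp with h | h
            · exact absurd h h2
            · exact absurd h h1
          · simp [h1, h3]; omega
    · rw [if_neg (by rw [hccp]; simpa using hcp)]
      push Not at hcp
      obtain ⟨hp2, hp1⟩ := hcp
      rw [PySem.Dict.get?_insert]
      by_cases h3 : n = pc.1
      · subst h3
        simp [parentsOf_eq_nil xs pc.1 hp1, Ne.symm hp2]
      · rw [if_neg h3, PySem.Dict.get?_insert]
        by_cases h2 : n = pc.2
        · subst h2; simp
        · rw [if_neg h2, ih]
          by_cases h1 : n ∈ nodesList xs
          · simp [h1]; omega
          · simp [h1, h3]; omega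

theorem mem_pstep_of_mem {anc : List (Int × Int)} {S : List Int} {x : Int} (h : x ∈ S) :
    x ∈ pstep anc S := by
  simp [pstep, List.mem_dedup]; exact Or.inl h

theorem mem_pstep_parent {anc : List (Int × Int)} {S : List Int} {a b : Int}
    (ha : a ∈ S) (hb : b ∈ parentsOf anc a) : b ∈ pstep anc S := by
  simp [pstep, List.mem_dedup, List.mem_flatMap]
  exact Or.inr ⟨a, ha, hb⟩

theorem pstep_mono {anc : List (Int × Int)} {S T : List Int} (h : ∀ x ∈ S, x ∈ T) :
    ∀ x ∈ pstep anc S, x ∈ pstep anc T := by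
  intro x hx
  simp [pstep, List.mem_dedup, List.mem_flatMap] at hx ⊢
  rcases hx with hx | ⟨a, ha, hx⟩
  · exact Or.inl (h x hx)
  · exact Or.inr ⟨a, h a ha, hx⟩

theorem reach_extensive {anc : List (Int × Int)} (k : Nat) {S : List Int} {x : Int} (h : x ∈ S) :
    x ∈ reachN anc k S := by
  induction k generalizing S with
  | zero => exact h
  | succ k ih =>
    rw [reachN, Function.iterate_succ_apply]
    exact ih (mem_pstep_of_mem h)

theorem reach_mono_set {anc : List (Int × Int)} (k : Nat) {S T : List Int}
    (h : ∀ x ∈ S, x ∈ T) : ∀ x ∈ reachN anc k S, x ∈ reachN anc k T := by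
  induction k generalizing S T with
  | zero => exact h
  | succ k ih =>
    intro x hx
    rw [reachN, Function.iterate_succ_apply] at hx ⊢
    exact ih (pstep_mono h) x hx

theorem reach_mono_k {anc : List (Int × Int)} {k m : Nat} (hkm : k ≤ m) {S : List Int} {x : Int}
    (h : x ∈ reachN anc k S) : x ∈ reachN anc m S := by
  obtain ⟨j, rfl⟩ := Nat.exists_eq_add_of_le hkm
  have h2 : x ∈ reachN anc k (reachN anc j S) := reach_mono_set k (fun y hy => reach_extensive j hy) x h
  simpa [reachN, Function.iterate_add_apply] using h2

theorem chain_mem_reach {anc : List (Int × Int)} :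
    ∀ (l S : List Int), List.IsChain (fun a b => b ∈ parentsOf anc a) l →
      (∀ a, l.head? = some a → a ∈ S) → ∀ x ∈ l, x ∈ reachN anc l.length S := by
  intro l
  induction l with
  | nil => intro S _ _ x hx; simp at hx
  | cons a t ih =>
    intro S hchain hhead x hx
    have ha : a ∈ S := hhead a rfl
    rcases List.mem_cons.mp hx with rfl | hx
    · exact reach_extensive _ ha
    · cases t with
      | nil => simp at hx
      | cons b t' =>
        rw [List.isChain_cons_cons] at hchain
        have hb : b ∈ pstep anc S := mem_pstep_parent ha hchain.1
        have := ih (pstep anc S) hchain.2 (by intro c hc; simp at hc; rw [← hc]; exact hb) x hx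
        rw [reachN] at this ⊢
        rw [List.length_cons, Function.iterate_succ_apply]
        exact this

theorem nodesList_length (anc : List (Int × Int)) : (nodesList anc).length = 2 * anc.length := by
  induction anc with
  | nil => rfl
  | cons pc t ih => simp [nodesList] at ih ⊢; omega

theorem mem_nodesList_of_parent {anc : List (Int × Int)} {a b : Int}
    (h : b ∈ parentsOf anc a) : b ∈ nodesList anc := by
  simp only [parentsOf, List.mem_map] at h
  obtain ⟨pc, hmem, rfl⟩ := h
  rw [List.mem_filter] at hmem
  exact List.mem_flatMap.mpr ⟨pc, hmem.1, by simp⟩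

theorem parentsOf_length_le (anc : List (Int × Int)) (n : Int) :
    (parentsOf anc n).length ≤ anc.length := by
  simp [parentsOf]
  exact List.length_filter_le _ _

theorem pigeon {anc : List (Int × Int)} {l : List Int} (hnd : l.Nodup)
    (hsub : ∀ x ∈ l, x ∈ nodesList anc) : l.length ≤ 2 * anc.length := by
  have := (List.subperm_of_subset hnd (fun x hx => hsub x hx)).length_le
  rwa [nodesList_length] at this

theorem nodup_concat' {l : List Int} {n : Int} (hnd : l.Nodup) (hn : n ∉ l) :
    (l ++ [n]).Nodup := by
  rw [List.nodup_append]
  refine ⟨hnd, List.nodup_singleton n, ?_⟩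
  intro a ha b hb
  rcases List.mem_singleton.mp hb with rfl
  exact fun h => hn (h ▸ ha)

theorem dfs_ok (anc : List (Int × Int)) (s : Int)
    (hacyc : ∀ n ∈ reachN anc (2 * anc.length + 2) [s],
      n ∉ reachN anc (2 * anc.length + 2) (parentsOf anc n)) :
    ∀ (f : Nat) (path : List Int) (n d : Int) (ds : PySem.Dict Int Int),
      List.IsChain (fun a b => b ∈ parentsOf anc a) (path ++ [n]) →
      (path ++ [n]).head? = some s →
      path.Nodup → (∀ x ∈ path, x ∈ nodesList anc) → n ∈ nodesList anc →
      2 * anc.length + 3 ≤ f + path.length →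
      ∃ ds', dfsA (buildA anc) f path n d ds = some ds' := by
  intro f
  induction f with
  | zero =>
    intro path n d ds _ _ hnd hsub hn hle
    exact absurd (pigeon hnd hsub) (by omega)
  | succ f ih =>
    intro path n d ds hchain hhead hnd hsub hn hle
    have hplen : path.length ≤ 2 * anc.length := pigeon hnd hsub
    by_cases hguard : n ∈ path
    · exfalso
      have h1 : n ∈ reachN anc (2 * anc.length + 2) [s] := by
        have := chain_mem_reach (path ++ [n]) [s] hchain
          (by intro a ha; rw [hhead] at ha; simp at ha; simp [ha])
          n (by simp)
        exact reach_mono_k (by simp; omega) this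
      obtain ⟨u, v, huv⟩ := List.append_of_mem hguard
      have hvlen : v.length + 1 ≤ path.length := by
        subst huv; simp
      have hsuf : List.IsChain (fun a b => b ∈ parentsOf anc a) (n :: (v ++ [n])) := by
        apply hchain.suffix
        rw [huv]
        refine ⟨u, by simp⟩
      have h2 : n ∈ reachN anc (2 * anc.length + 2) (parentsOf anc n) := by
        cases hv : v ++ [n] with
        | nil => simp at hv
        | cons b t =>
          rw [hv, List.isChain_cons_cons] at hsuf
          have := chain_mem_reach (v ++ [n]) (parentsOf anc n)
            (by rw [hv]; exact hsuf.2)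
            (by intro a ha; rw [hv] at ha; simp at ha; subst ha; exact hsuf.1)
            n (by simp)
          exact reach_mono_k (by simp; omega) this
      exact hacyc n h1 h2
    · rw [dfsA, if_neg hguard, buildA_get?, if_pos hn]
      have hfold : ∀ (ps : List Int), (∀ p ∈ ps, p ∈ parentsOf anc n) →
          ∀ ds0 : PySem.Dict Int Int,
          ∃ ds', ps.foldl (fun acc p =>
              acc.bind (fun ds' => dfsA (buildA anc) f (path ++ [n]) p (d + 1) (ds'.insert p (d + 1))))
            (some ds0) = some ds' := by
        intro ps
        induction ps with
        | nil => intro _ ds0; exact ⟨ds0, rfl⟩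
        | cons p ps ihp =>
          intro hps ds0
          have hp := hps p (by simp)
          obtain ⟨dsm, hdsm⟩ := ih (path ++ [n]) p (d + 1) (ds0.insert p (d + 1))
            (by
              rw [List.isChain_append]
              refine ⟨hchain, by simp, ?_⟩
              intro x hx y hy
              simp at hx hy
              subst hx; subst hy; exact hp)
            (by rw [List.head?_append_of_ne_nil]; exact hhead; simp)
            (nodup_concat' hnd hguard)
            (by intro x hx; rcases List.mem_append.mp hx with h | h
                · exact hsub x h
                · simp at h; rw [h]; exact hn)
            (mem_nodesList_of_parent hp)
            (by simp; omega)
          rw [List.foldl_cons]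
          have hred : ((some ds0).bind fun ds' => dfsA (buildA anc) f (path ++ [n]) p (d + 1) (ds'.insert p (d + 1))) = some dsm := by
            simpa using hdsm
          rw [hred]
          exact ihp (fun q hq => hps q (by simp [hq])) dsm
      exact hfold (parentsOf anc n) (fun _ h => h) ds

theorem foldl_none {α β : Type} (g : Option β → α → Option β) (hg : ∀ a, g none a = none) :
    ∀ l : List α, l.foldl g none = none := by
  intro l; induction l with
  | nil => rfl
  | cons a t ih => rw [List.foldl_cons, hg]; exact ih

theorem bridge (kp : PySem.Dict Int (List Int)) (L : Nat)
    (hlen : ∀ n ps, kp.get? n = some ps → ps.length ≤ L) :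
    ∀ (f : Nat) (path : List Int) (n d : Int) (ds ds₁ : PySem.Dict Int Int),
      0 ≤ d → dfsA kp f path n d ds = some ds₁ →
      ∃ k : Nat, k + 1 ≤ (L + 1) ^ f ∧
        ∀ (F : Nat) (rest : List (Int × Int)) (ds₀ : PySem.Dict Int Int),
          (if d ≠ 0 then ds₀.insert n d else ds₀) = ds →
          loopB kp (F + (k + 1)) ((n, d) :: rest) ds₀ = loopB kp F rest ds₁ := by
  intro f
  induction f with
  | zero => intro path n d ds ds₁ _ h; exact absurd h (by simp [dfsA])
  | succ f ihf =>
    intro path n d ds ds₁ hd hsucc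
    rw [dfsA] at hsucc
    by_cases hguard : n ∈ path
    · rw [if_pos hguard] at hsucc; exact absurd hsucc (by simp)
    · rw [if_neg hguard] at hsucc
      cases hget : kp.get? n with
      | none => rw [hget] at hsucc; exact absurd hsucc (by simp)
      | some ps =>
        rw [hget] at hsucc
        have hfold : ∀ (ps' : List Int) (ds0 dsr : PySem.Dict Int Int),
            ps'.foldl (fun acc p =>
                acc.bind (fun ds' => dfsA kp f (path ++ [n]) p (d + 1) (ds'.insert p (d + 1))))
              (some ds0) = some dsr →
            ∃ k : Nat, k ≤ ps'.length * (L + 1) ^ f ∧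
              ∀ (F : Nat) (rest : List (Int × Int)),
                loopB kp (F + k) (ps'.map (fun p => (p, d + 1)) ++ rest) ds0 = loopB kp F rest dsr := by
          intro ps'
          induction ps' with
          | nil =>
            intro ds0 dsr h
            refine ⟨0, by simp, ?_⟩
            intro F rest
            simp only [List.map_nil, List.nil_append, Nat.add_zero]
            injection h with h; rw [h]
          | cons p t iht =>
            intro ds0 dsr h
            rw [List.foldl_cons] at h
            cases hacc : dfsA kp f (path ++ [n]) p (d + 1) (ds0.insert p (d + 1)) with
            | none =>
              rw [show ((some ds0).bind fun ds' => dfsA kp f (path ++ [n]) p (d + 1) (ds'.insert p (d + 1))) = none from hacc] at h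
              rw [foldl_none (fun acc p => acc.bind fun ds' => dfsA kp f (path ++ [n]) p (d + 1) (ds'.insert p (d + 1))) (fun a => rfl) t] at h
              exact absurd h (by simp)
            | some dsm =>
              rw [show ((some ds0).bind fun ds' => dfsA kp f (path ++ [n]) p (d + 1) (ds'.insert p (d + 1))) = some dsm from hacc] at h
              obtain ⟨k₁, hk₁, hp₁⟩ := ihf (path ++ [n]) p (d + 1) (ds0.insert p (d + 1)) dsm (by omega) hacc
              obtain ⟨k₂, hk₂, hp₂⟩ := iht dsm dsr h
              refine ⟨(k₁ + 1) + k₂, ?_, ?_⟩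
              · have : (t.length + 1) * (L + 1) ^ f = (L + 1) ^ f + t.length * (L + 1) ^ f := by ring
                simp only [List.length_cons, this]
                omega
              · intro F rest
                have harr : F + ((k₁ + 1) + k₂) = (F + k₂) + (k₁ + 1) := by omega
                rw [List.map_cons, List.cons_append, harr]
                rw [hp₁ (F + k₂) (t.map (fun p => (p, d + 1)) ++ rest) ds0
                  (by rw [if_pos (by omega : d + 1 ≠ 0)])]
                exact hp₂ F rest
        obtain ⟨k, hk, hp⟩ := hfold ps ds ds₁ hsucc
        refine ⟨k, ?_, ?_⟩
        · have hps : ps.length ≤ L := hlen n ps hget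
          have hpow : 1 ≤ (L + 1) ^ f := Nat.one_le_pow _ _ (by omega)
          have : (L + 1) ^ (f + 1) = L * (L + 1) ^ f + (L + 1) ^ f := by ring
          have hmul : ps.length * (L + 1) ^ f ≤ L * (L + 1) ^ f := Nat.mul_le_mul_right _ hps
          omega
        · intro F rest ds₀ hcond
          have : F + (k + 1) = (F + k) + 1 := by omega
          rw [this, loopB, hget, hcond]
          exact hp F rest

theorem dfs_values (kp : PySem.Dict Int (List Int)) :
    ∀ (f : Nat) (path : List Int) (n d : Int) (ds ds₁ : PySem.Dict Int Int),
      0 ≤ d → (∀ v ∈ ds.values, 1 ≤ v) → dfsA kp f path n d ds = some ds₁ →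
      ∀ v ∈ ds₁.values, 1 ≤ v := by
  intro f
  induction f with
  | zero => intro path n d ds ds₁ _ _ h; exact absurd h (by simp [dfsA])
  | succ f ihf =>
    intro path n d ds ds₁ hd hv hsucc
    rw [dfsA] at hsucc
    by_cases hguard : n ∈ path
    · rw [if_pos hguard] at hsucc; exact absurd hsucc (by simp)
    · rw [if_neg hguard] at hsucc
      cases hget : kp.get? n with
      | none => rw [hget] at hsucc; exact absurd hsucc (by simp)
      | some ps =>
        rw [hget] at hsucc
        have hfold : ∀ (ps' : List Int) (ds0 : PySem.Dict Int Int),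
            (∀ v ∈ ds0.values, 1 ≤ v) →
            ps'.foldl (fun acc p =>
                acc.bind (fun ds' => dfsA kp f (path ++ [n]) p (d + 1) (ds'.insert p (d + 1))))
              (some ds0) = some ds₁ →
            ∀ v ∈ ds₁.values, 1 ≤ v := by
          intro ps'
          induction ps' with
          | nil =>
            intro ds0 hv0 h
            injection h with h; rw [← h]; exact hv0
          | cons p t iht =>
            intro ds0 hv0 h
            rw [List.foldl_cons] at h
            cases hacc : dfsA kp f (path ++ [n]) p (d + 1) (ds0.insert p (d + 1)) with
            | none =>
              rw [show ((some ds0).bind fun ds' => dfsA kp f (path ++ [n]) p (d + 1) (ds'.insert p (d + 1))) = none from hacc] at h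
              rw [foldl_none (fun acc p => acc.bind fun ds' => dfsA kp f (path ++ [n]) p (d + 1) (ds'.insert p (d + 1))) (fun a => rfl) t] at h
              exact absurd h (by simp)
            | some dsm =>
              rw [show ((some ds0).bind fun ds' => dfsA kp f (path ++ [n]) p (d + 1) (ds'.insert p (d + 1))) = some dsm from hacc] at h
              have hvm : ∀ v ∈ dsm.values, 1 ≤ v := by
                apply ihf (path ++ [n]) p (d + 1) (ds0.insert p (d + 1)) dsm (by omega) ?_ hacc
                intro v hvmem
                rcases PySem.Dict.mem_values_insert ds0 p (d + 1) v hvmem with h' | h'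
                · omega
                · exact hv0 v h'
              exact iht dsm hvm h
        exact hfold ps ds hv hsucc

theorem sel_aux (k : Int → Int) :
    ∀ (t : List Int) (c : Int),
      (t.foldl (fun acc n => if k n > acc.1 then (k n, some n) else acc) (k c, some c)).2
        = PySem.List.max? (c :: t) k := by
  intro t
  induction t with
  | nil => intro c; simp [PySem.List.max?]
  | cons n t ih =>
    intro c
    rw [List.foldl_cons]
    by_cases h : k c < k n
    · rw [if_pos (by simpa using h)]
      rw [ih n]
      simp [PySem.List.max?, h]
    · rw [if_neg (by simpa using h)]
      rw [ih c]
      simp [PySem.List.max?, h]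

theorem sel (k : Int → Int) (l : List Int) (hpos : ∀ n ∈ l, 1 ≤ k n) :
    (l.foldl (fun acc n => if k n > acc.1 then (k n, some n) else acc)
      ((0 : Int), (none : Option Int))).2 = PySem.List.max? l k := by
  cases l with
  | nil => rfl
  | cons n t =>
    have h1 : (1 : Int) ≤ k n := hpos n (by simp)
    rw [List.foldl_cons, if_pos (by omega : k n > (0 : Int))]
    exact sel_aux k t n

theorem getD_pos (q : PySem.Dict Int Int) (hv : ∀ v ∈ q.values, 1 ≤ v) :
    ∀ n ∈ q.keys, 1 ≤ q.getD n 0 := by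
  intro n hn
  cases hg : q.get? n with
  | none => exact absurd hn (PySem.Dict.get?_eq_none_iff_not_mem_keys q n |>.mp hg)
  | some v =>
    rw [PySem.Dict.getD_eq_get?_getD, hg]
    have hitems := PySem.Dict.mem_items_of_get?_eq_some q hg
    exact hv v (List.mem_map.mpr ⟨(n, v), hitems, rfl⟩)

theorem arith (L : Nat) : (L + 1) ^ (2 * L + 3) + 1 ≤ (L + 2) ^ (2 * L + 4) := by
  have h1 : (L + 1) ^ (2 * L + 3) ≤ (L + 2) ^ (2 * L + 3) :=
    Nat.pow_le_pow_left (by omega) _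
  have h2 : 1 ≤ (L + 2) ^ (2 * L + 3) := Nat.one_le_pow _ _ (by omega)
  have h3 : 2 * (L + 2) ^ (2 * L + 3) ≤ (L + 2) * (L + 2) ^ (2 * L + 3) :=
    Nat.mul_le_mul_right _ (by omega)
  have h4 : (L + 2) * (L + 2) ^ (2 * L + 3) = (L + 2) ^ (2 * L + 4) := by ring
  omega

theorem main_eq (anc : List (Int × Int)) (s : Int) (hpre : Pre_earliest_ancestor_v2 anc s) :
    earliest_ancestor_v2 anc s = earliest_ancestor_v2_alt anc s := by
  obtain ⟨hs, hacyc⟩ := hpre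
  obtain ⟨ds₁, hA⟩ := dfs_ok anc s hacyc (2 * anc.length + 3) [] s 0 PySem.Dict.empty
    (by simp) (by simp) List.nodup_nil (by simp) hs (by simp)
  have hlen : ∀ n ps, (buildA anc).get? n = some ps → ps.length ≤ anc.length := by
    intro n ps h
    rw [buildA_get?] at h
    by_cases hmem : n ∈ nodesList anc
    · rw [if_pos hmem] at h
      injection h with h
      rw [← h]
      exact parentsOf_length_le anc n
    · rw [if_neg hmem] at h; exact absurd h (by simp)
  obtain ⟨k, hk, hloop⟩ := bridge (buildA anc) anc.length hlen (2 * anc.length + 3) [] s 0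
    PySem.Dict.empty ds₁ le_rfl hA
  have harith := arith anc.length
  have hkFB : k + 2 ≤ (anc.length + 2) ^ (2 * anc.length + 4) := by omega
  have hBloop : loopB (buildA anc) ((anc.length + 2) ^ (2 * anc.length + 4)) [(s, 0)] PySem.Dict.empty = some ds₁ := by
    have hFB : ((anc.length + 2) ^ (2 * anc.length + 4) - (k + 1)) + (k + 1)
        = (anc.length + 2) ^ (2 * anc.length + 4) := by omega
    rw [← hFB]
    rw [hloop ((anc.length + 2) ^ (2 * anc.length + 4) - (k + 1)) [] PySem.Dict.empty (by simp)]
    obtain ⟨m, hm⟩ : ∃ m, (anc.length + 2) ^ (2 * anc.length + 4) - (k + 1) = m + 1 :=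
      ⟨(anc.length + 2) ^ (2 * anc.length + 4) - (k + 1) - 1, by omega⟩
    rw [hm]
    rfl
  have hval : ∀ v ∈ ds₁.values, 1 ≤ v :=
    dfs_values (buildA anc) (2 * anc.length + 3) [] s 0 PySem.Dict.empty ds₁ le_rfl
      (by intro v hv; simp [PySem.Dict.empty, PySem.Dict.values] at hv) hA
  have hsel := sel (fun n => ds₁.getD n 0) ds₁.keys (getD_pos ds₁ hval)
  unfold earliest_ancestor_v2 earliest_ancestor_v2_alt
  rw [build_eq]
  simp only [hA, hBloop, hsel]

-- ===== VERDICT (by name: the statement is the Claim_ definition above) =====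
theorem earliest_ancestor_v2_spec : Claim_equal_earliest_ancestor_v2 := by
  intro ancestors starting_node _ hpre
  unfold Spec_earliest_ancestor_v2
  exact main_eq ancestors starting_node hpre
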